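-- pv_equiv track=rewrite | github.com/KoilakondaMadhu/dump | warehouse1.py | min_vehicles
-- ===== SOURCE A (Python) =====
-- def min_vehicles(weights, max_weight_limit):
--     weights.sort(reverse=True)  # Sort weights in descending order
--     vehicles_count = 0
--
--     while weights:
--         current_weight = weights.pop(0)
--
--         # Find the heaviest available weight that can be paired with the current weight
--         pair_index = -1
--         for i in range(len(weights) - 1, -1, -1):
--             if current_weight + weights[i] <= max_weight_limit:
--                 pair_index = i
--                 break
--
--         if pair_index != -1:
--             weights.pop(pair_index)
--
--         vehicles_count += 1
--
--     return vehicles_count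
-- ===== SOURCE B (Python) =====
-- def min_vehicles(weights, max_weight_limit):
--     w = sorted(weights, reverse=True)
--     i, j = 0, len(w) - 1
--     count = 0
--     while i <= j:
--         if i < j and w[i] + w[j] <= max_weight_limit:
--             j -= 1
--         i += 1
--         count += 1
--     return count
-- ===== Notes on version B (the rewrite author's own statement) =====
-- stated objective: faster
-- what changed: Replaced A's destructive loop (pop(0), a backwards linear scan for a partner, pop(i)) with a single descending sort followed by a two-pointer sweep pairing the heaviest remaining with the lightest remaining, turning O(n^2) list surgery into O(n log n) sort + O(n) scan.
import Mathlib
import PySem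

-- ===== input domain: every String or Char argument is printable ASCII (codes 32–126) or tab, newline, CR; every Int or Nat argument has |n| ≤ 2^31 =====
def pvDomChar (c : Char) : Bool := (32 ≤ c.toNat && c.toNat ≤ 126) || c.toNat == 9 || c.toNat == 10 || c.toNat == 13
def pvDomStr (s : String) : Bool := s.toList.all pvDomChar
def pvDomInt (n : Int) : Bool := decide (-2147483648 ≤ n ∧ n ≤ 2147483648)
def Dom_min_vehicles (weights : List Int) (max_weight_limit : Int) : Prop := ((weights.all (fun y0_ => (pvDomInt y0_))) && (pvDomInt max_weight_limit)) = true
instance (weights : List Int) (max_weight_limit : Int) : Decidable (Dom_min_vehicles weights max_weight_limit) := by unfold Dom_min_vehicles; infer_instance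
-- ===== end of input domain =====

-- B replaces A's repeated pop(0)/backwards-scan/pop(i) with one sort and a two-pointer sweep
-- (O(n log n) vs O(n^2)); equivalence is about the return value only — A empties its argument
-- list in place, B leaves it unchanged.

-- ===== PORT A =====
-- A's inner 'for i in range(len(weights)-1, -1, -1): if …: pair_index = i; break' (pair_index = -1 if no break);
-- indices produced by the range are always in range, so pyGetD is exact here
def aFindLoop (cur limit : Int) (ws : List Int) : List Int → Int
  | [] => -1
  | i :: rest =>
    if cur + PySem.List.pyGetD ws i 0 ≤ limit then i else aFindLoop cur limit ws rest

-- one iteration of A's while loop applied to the list after 'current_weight = weights.pop(0)'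
def aStep (limit x : Int) (rest : List Int) : List Int :=
  let pi := aFindLoop x limit rest (PySem.List.pyRange ((rest.length : Int) - 1) (-1) (-1))
  if pi ≠ -1 then ((PySem.List.pop? rest pi).map Prod.snd).getD rest else rest

theorem aStep_length_le (limit x : Int) (rest : List Int) :
    (aStep limit x rest).length ≤ rest.length := by
  simp only [aStep]
  split
  · cases h : PySem.List.pop? rest (aFindLoop x limit rest (PySem.List.pyRange ((rest.length : Int) - 1) (-1) (-1))) with
    | none => simp
    | some r =>
        have := PySem.List.length_of_pop?_eq_some rest h
        simp
        omega
  · exact le_refl _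

-- A's while loop
def aLoop (limit : Int) (ws : List Int) : Int :=
  match ws with
  | [] => 0
  | x :: rest => 1 + aLoop limit (aStep limit x rest)
termination_by ws.length
decreasing_by
  have := aStep_length_le limit x rest
  simp only [List.length_cons]; omega

def min_vehicles (weights : List Int) (max_weight_limit : Int) : Int :=
  aLoop max_weight_limit (PySem.List.sorted weights id true)

-- ===== PORT B =====
-- B's 'while i <= j: if i < j and w[i]+w[j] <= max_weight_limit: j -= 1; i += 1; count += 1'
def bLoop (w : List Int) (limit : Int) (i j : Int) : Int :=
  if h : i ≤ j then
    if i < j ∧ PySem.List.pyGetD w i 0 + PySem.List.pyGetD w j 0 ≤ limit then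
      1 + bLoop w limit (i + 1) (j - 1)
    else
      1 + bLoop w limit (i + 1) j
  else 0
termination_by (j + 1 - i).toNat
decreasing_by all_goals omega

def min_vehicles_alt (weights : List Int) (max_weight_limit : Int) : Int :=
  let w := PySem.List.sorted weights id true
  bLoop w max_weight_limit 0 ((w.length : Int) - 1)

-- ===== PRECONDITION & SPEC =====
def Spec_min_vehicles (weights : List Int) (max_weight_limit : Int) (out : Int) : Prop := out = min_vehicles_alt weights max_weight_limit
instance (weights : List Int) (max_weight_limit : Int) (out : Int) : Decidable (Spec_min_vehicles weights max_weight_limit out) := by unfold Spec_min_vehicles; infer_instance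

-- ===== CLAIM (what is proved, stated in full; the proofs are below) =====
def Claim_equal_min_vehicles : Prop := ∀ (weights : List Int) (max_weight_limit : Int), Dom_min_vehicles weights max_weight_limit → Spec_min_vehicles weights max_weight_limit (min_vehicles weights max_weight_limit)

-- ===== LEMMAS AND PROOFS =====

-- common specification of both loops on a descending list: pair the head with the last element if it fits
def gSpec (limit : Int) (ws : List Int) : Int :=
  match ws with
  | [] => 0
  | x :: rest =>
    match rest.getLast? with
    | none => 1
    | some y =>
      if x + y ≤ limit then 1 + gSpec limit rest.dropLast else 1 + gSpec limit rest
termination_by ws.length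
decreasing_by
  · simp only [List.length_cons, List.length_dropLast]; omega
  · simp only [List.length_cons]; omega

-- the backwards scan finds nothing when no admitted index fits
theorem aFindLoop_none (cur limit : Int) (ws : List Int) (b : Int) :
    ∀ (n : Nat) (a : Int), (a - b).toNat ≤ n →
      (∀ i : Int, b < i → i ≤ a → ¬ (cur + PySem.List.pyGetD ws i 0 ≤ limit)) →
      aFindLoop cur limit ws (PySem.List.pyRange a b (-1)) = -1 := by
  intro n
  induction n with
  | zero =>
      intro a hn _h
      rw [PySem.List.pyRange_neg_one_eq_nil (by omega)]
      rfl
  | succ n ih =>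
      intro a hn h
      by_cases hab : a ≤ b
      · rw [PySem.List.pyRange_neg_one_eq_nil hab]
        rfl
      · rw [PySem.List.pyRange_neg_one_cons (by omega)]
        simp only [aFindLoop]
        rw [if_neg (h a (by omega) le_rfl)]
        exact ih (a - 1) (by omega) (fun i h1 h2 => h i h1 (by omega))

-- one step of A on a descending list: pair with the last element iff it fits
theorem aStep_eq (limit x : Int) (rest : List Int)
    (hp : rest.Pairwise (fun a b => b ≤ a)) :
    aStep limit x rest =
      match rest.getLast? with
      | none => rest
      | some y => if x + y ≤ limit then rest.dropLast else rest := by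
  unfold aStep
  cases rest with
  | nil =>
      simp [aFindLoop]
  | cons r rs =>
      set l : List Int := r :: rs with hl
      have hlen : 1 ≤ l.length := by simp [hl]
      have hne : l ≠ [] := by simp [hl]
      have hlast : l.getLast? = some (l.getLast hne) := List.getLast?_eq_some_getLast hne
      have hlast_get : l.getLast hne = l[l.length - 1] := List.getLast_eq_getElem hne
      have hget : PySem.List.pyGetD l ((l.length : Int) - 1) 0 = l.getLast hne := by
        rw [PySem.List.pyGetD_eq_getElem l 0 (by omega) (by omega)]
        rw [hlast_get]
        congr 1
        omega
      by_cases hfit : x + l.getLast hne ≤ limit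
      · -- the scan hits index len-1 immediately
        rw [PySem.List.pyRange_neg_one_cons (by omega)]
        simp only [aFindLoop]
        rw [hget, if_pos hfit]
        have hcast : (l.length : Int) - 1 = ((l.length - 1 : Nat) : Int) := by omega
        rw [if_pos (by omega), hcast,
            PySem.List.pop?_natCast l (l.length - 1) (by omega)]
        have : l.eraseIdx (l.length - 1) = l.dropLast :=
          (List.dropLast_eq_eraseIdx (by omega)).symm
        simp [hlast, hfit, this]
      · -- nothing fits: every index holds a value ≥ the last one
        have hnone : ∀ i : Int, (-1 : Int) < i → i ≤ (l.length : Int) - 1 →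
            ¬ (x + PySem.List.pyGetD l i 0 ≤ limit) := by
          intro i h1 h2
          have hi0 : 0 ≤ i := by omega
          have hilt : i < (l.length : Int) := by omega
          rw [PySem.List.pyGetD_eq_getElem l 0 hi0 hilt]
          have hle : l.getLast hne ≤ l[i.toNat] := by
            rw [hlast_get]
            rcases Nat.lt_or_ge i.toNat (l.length - 1) with hlt | hge
            · exact (List.pairwise_iff_getElem.mp hp) i.toNat (l.length - 1)
                (by omega) (by omega) hlt
            · have : i.toNat = l.length - 1 := by omega
              simp [this]
          omega
        rw [aFindLoop_none x limit l (-1) ((l.length : Int) - 1 - (-1)).toNat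
              ((l.length : Int) - 1) le_rfl hnone]
        simp [hlast, hfit]

-- A's loop computes gSpec on any descending list
theorem aLoop_eq_gSpec (limit : Int) :
    ∀ (n : Nat) (ws : List Int), ws.length ≤ n →
      ws.Pairwise (fun a b => b ≤ a) → aLoop limit ws = gSpec limit ws := by
  intro n
  induction n with
  | zero =>
      intro ws hn _
      have : ws = [] := List.eq_nil_of_length_eq_zero (by omega)
      subst this; simp [aLoop, gSpec]
  | succ n ih =>
      intro ws hn hp
      cases ws with
      | nil => simp [aLoop, gSpec]
      | cons x rest =>
          have hprest : rest.Pairwise (fun a b => b ≤ a) := hp.of_cons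
          rw [aLoop, gSpec, aStep_eq limit x rest hprest]
          cases hlast : rest.getLast? with
          | none =>
              have : rest = [] := by
                cases rest with
                | nil => rfl
                | cons a b => simp [List.getLast?_eq_some_getLast] at hlast
              subst this
              rw [aLoop]
              simp
          | some y =>
              dsimp only
              by_cases hfit : x + y ≤ limit
              · rw [if_pos hfit, if_pos hfit]
                have hpd : rest.dropLast.Pairwise (fun a b => b ≤ a) :=
                  hprest.sublist (List.dropLast_sublist rest)
                have hld : rest.dropLast.length ≤ n := by
                  simp only [List.length_cons] at hn
                  simp only [List.length_dropLast]; omega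
                rw [ih rest.dropLast hld hpd]
              · rw [if_neg hfit, if_neg hfit]
                have hlr : rest.length ≤ n := by
                  simp only [List.length_cons] at hn; omega
                rw [ih rest hlr hprest]

-- B's two-pointer loop computes gSpec on the segment w[i..j]
theorem bLoop_eq_gSpec (limit : Int) (w : List Int) :
    ∀ (n : Nat) (i j : Nat), j + 1 - i ≤ n → j < w.length →
      bLoop w limit (i : Int) (j : Int) = gSpec limit ((w.drop i).take (j + 1 - i)) := by
  intro n
  induction n with
  | zero =>
      intro i j hn hj
      have hij : j < i := by omega
      rw [bLoop, dif_neg (by omega : ¬ ((i : Int) ≤ (j : Int)))]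
      have : j + 1 - i = 0 := by omega
      rw [this]
      simp [gSpec]
  | succ n ih =>
      intro i j hn hj
      by_cases hij : i ≤ j
      · have hidx : i < w.length := by omega
        have hgi : PySem.List.pyGetD w (i : Int) 0 = w[i] := by
          rw [PySem.List.pyGetD_eq_getElem w 0 (by omega) (by exact_mod_cast hidx)]
          simp
        have hgj : PySem.List.pyGetD w (j : Int) 0 = w[j] := by
          rw [PySem.List.pyGetD_eq_getElem w 0 (by omega) (by exact_mod_cast hj)]
          simp
        have hdrop : w.drop i = w[i] :: w.drop (i + 1) := List.drop_eq_getElem_cons hidx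
        by_cases hlt : i < j
        · -- nonempty rest with last element w[j]
          have hrestlen : ((w.drop (i + 1)).take (j - i)).length = j - i := by
            simp [List.length_take, List.length_drop]; omega
          have hrest_get : ∀ (k : Nat) (hk : k < j - i),
              ((w.drop (i + 1)).take (j - i))[k]'(by omega) = w[i + 1 + k]'(by omega) := by
            intro k hk
            rw [List.getElem_take, List.getElem_drop]
          have hlast : ((w.drop (i + 1)).take (j - i)).getLast? = some w[j] := by
            have hne : ((w.drop (i + 1)).take (j - i)) ≠ [] := by
              intro hc
              have := congrArg List.length hc
              simp [hrestlen] at this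
              omega
            rw [List.getLast?_eq_some_getLast hne, List.getLast_eq_getElem hne]
            congr 1
            have h1 := hrest_get (((w.drop (i + 1)).take (j - i)).length - 1) (by omega)
            rw [h1]
            congr 1
            omega
          have hseg : (w.drop i).take (j + 1 - i) = w[i] :: (w.drop (i + 1)).take (j - i) := by
            rw [hdrop]
            have : j + 1 - i = (j - i) + 1 := by omega
            rw [this, List.take_succ_cons]
          rw [bLoop, dif_pos (by omega : (i : Int) ≤ (j : Int)), hgi, hgj, hseg, gSpec, hlast]
          dsimp only
          by_cases hfit : w[i] + w[j] ≤ limit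
          · rw [if_pos ⟨by omega, hfit⟩, if_pos hfit]
            have hc1 : ((i : Int) + 1) = ((i + 1 : Nat) : Int) := by omega
            have hc2 : ((j : Int) - 1) = ((j - 1 : Nat) : Int) := by omega
            rw [hc1, hc2, ih (i + 1) (j - 1) (by omega) (by omega)]
            have hdl : ((w.drop (i + 1)).take (j - i)).dropLast
                = (w.drop (i + 1)).take ((j - 1) + 1 - (i + 1)) := by
              rw [List.dropLast_eq_take, hrestlen, List.take_take]
              congr 1
              omega
            rw [hdl]
          · rw [if_neg (by intro hc; exact hfit hc.2), if_neg hfit]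
            have hc1 : ((i : Int) + 1) = ((i + 1 : Nat) : Int) := by omega
            rw [hc1, ih (i + 1) j (by omega) hj]
            have he : j + 1 - (i + 1) = j - i := by omega
            rw [he]
        · -- i = j: a single element
          have hij' : i = j := by omega
          subst hij'
          have hseg : (w.drop i).take (i + 1 - i) = [w[i]] := by
            rw [show i + 1 - i = 1 from by omega, hdrop]
            rfl
          rw [bLoop, dif_pos le_rfl, if_neg (by intro hc; exact absurd hc.1 (by omega)),
              hseg, gSpec]
          have hc1 : ((i : Int) + 1) = ((i + 1 : Nat) : Int) := by omega
          rw [hc1, ih (i + 1) i (by omega) hidx]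
          have : i + 1 - (i + 1) = 0 := by omega
          rw [this]
          simp [gSpec]
      · rw [bLoop, dif_neg (by omega : ¬ ((i : Int) ≤ (j : Int)))]
        have : j + 1 - i = 0 := by omega
        rw [this]
        simp [gSpec]

-- ===== VERDICT (by name: the statement is the Claim_ definition above) =====
theorem min_vehicles_spec : Claim_equal_min_vehicles := by
  intro weights limit _hdom
  unfold Spec_min_vehicles min_vehicles min_vehicles_alt
  set w : List Int := PySem.List.sorted weights id true with hw
  show aLoop limit w = bLoop w limit 0 ((w.length : Int) - 1)
  have hp : w.Pairwise (fun a b => b ≤ a) := by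
    have := PySem.List.sorted_pairwise_rev weights (id : Int → Int)
    simpa [hw] using this
  rw [aLoop_eq_gSpec limit w.length w le_rfl hp]
  cases hwn : w with
  | nil =>
      rw [bLoop]
      norm_num [gSpec]
  | cons a b =>
      rw [← hwn]
      have hlen : 1 ≤ w.length := by rw [hwn]; simp
      have hc : ((w.length : Int) - 1) = ((w.length - 1 : Nat) : Int) := by omega
      have h0 : ((0 : Nat) : Int) = (0 : Int) := rfl
      rw [hc, ← h0, bLoop_eq_gSpec limit w w.length 0 (w.length - 1) (by omega) (by omega)]
      have : (w.drop 0).take (w.length - 1 + 1 - 0) = w := by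
        simp; omega
      rw [this]
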